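-- pv_equiv track=rewrite | github.com/niklas-heer/speed-comparison | scripts/audit_language_versions.py | numeric_parts
-- ===== SOURCE A (Python) =====
-- def numeric_parts(version: str) -> tuple[int, ...]:
--     """Extract numeric components of a version string."""
--     parts = []
--     current = ""
--     for ch in version:
--         if ch.isdigit():
--             current += ch
--         elif current:
--             parts.append(int(current))
--             current = ""
--     if current:
--         parts.append(int(current))
--     return tuple(parts)
-- ===== SOURCE B (Python) =====
-- def numeric_parts(version: str) -> tuple[int, ...]:
--     """Extract numeric components of a version string (run-scanning two-pointer version)."""
--     parts = []
--     i, n = 0, len(version)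
--     while i < n:
--         if version[i].isdigit():
--             j = i
--             while j < n and version[j].isdigit():
--                 j += 1
--             parts.append(int(version[i:j]))
--             i = j
--         else:
--             i += 1
--     return tuple(parts)
-- ===== Notes on version B (the rewrite author's own statement) =====
-- stated objective: alternative
-- what changed: Replaces the character-by-character accumulator state machine (with a post-loop flush) by a two-pointer run scanner that finds each maximal digit run, converts the slice with one int() call, and jumps past it; no running string accumulator and no flush.
import Mathlib
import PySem

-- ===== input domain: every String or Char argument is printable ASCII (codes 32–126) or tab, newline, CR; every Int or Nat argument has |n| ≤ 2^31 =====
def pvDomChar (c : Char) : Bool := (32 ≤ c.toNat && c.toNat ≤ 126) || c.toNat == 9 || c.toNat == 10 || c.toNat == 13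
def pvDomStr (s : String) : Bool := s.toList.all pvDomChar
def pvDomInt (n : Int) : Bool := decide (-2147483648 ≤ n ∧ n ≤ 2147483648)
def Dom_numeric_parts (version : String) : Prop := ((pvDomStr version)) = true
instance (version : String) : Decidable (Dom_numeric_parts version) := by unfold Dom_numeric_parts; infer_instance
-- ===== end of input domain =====

-- B changes the decomposition (two-pointer run scanner instead of A's accumulator state machine); same values.

-- int("...") on a nonempty all-digit string always succeeds; the .getD 0 default is never reached.
def pvToInt (cs : List Char) : Int := (PySem.Int.ofChars? cs).getD 0

-- ===== PORT A =====
-- A: fold over the characters with state (parts, current), then flush current.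
def numeric_parts (version : String) : List Int :=
  let st := version.toList.foldl
    (fun (st : List Int × List Char) ch =>
      if PySem.Chars.isdigit ch then (st.1, st.2 ++ [ch])
      else if st.2 ≠ [] then (st.1 ++ [pvToInt st.2], [])
      else st)
    ([], [])
  if st.2 ≠ [] then st.1 ++ [pvToInt st.2] else st.1

-- ===== PORT B =====
-- B: scan for maximal digit runs (takeWhile/dropWhile = the two-pointer j-scan), int() each run.
def numeric_parts_altGo : List Char → List Int
  | [] => []
  | c :: rest =>
    if PySem.Chars.isdigit c then
      pvToInt (c :: rest.takeWhile PySem.Chars.isdigit)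
        :: numeric_parts_altGo (rest.dropWhile PySem.Chars.isdigit)
    else
      numeric_parts_altGo rest
termination_by cs => cs.length
decreasing_by
  · simpa using Nat.lt_succ_of_le (List.length_dropWhile_le _ _)
  · simp

def numeric_parts_alt (version : String) : List Int :=
  numeric_parts_altGo version.toList

-- ===== PRECONDITION & SPEC =====
def Spec_numeric_parts (version : String) (out : List Int) : Prop := out = numeric_parts_alt version
instance (version : String) (out : List Int) : Decidable (Spec_numeric_parts version out) := by unfold Spec_numeric_parts; infer_instance

-- ===== CLAIM (what is proved, stated in full; the proofs are below) =====
def Claim_equal_numeric_parts : Prop := ∀ (version : String), Dom_numeric_parts version → Spec_numeric_parts version (numeric_parts version)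

-- ===== LEMMAS AND PROOFS =====

-- A's loop with pending accumulator `cur`, including the final flush, as one recursion.
def pvAGo (cur : List Char) : List Char → List Int
  | [] => if cur ≠ [] then [pvToInt cur] else []
  | c :: rest =>
    if PySem.Chars.isdigit c then pvAGo (cur ++ [c]) rest
    else if cur ≠ [] then pvToInt cur :: pvAGo [] rest
    else pvAGo [] rest

lemma pvAGo_eq_foldl (cs : List Char) : ∀ (parts : List Int) (cur : List Char),
    (let st := cs.foldl
      (fun (st : List Int × List Char) ch =>
        if PySem.Chars.isdigit ch then (st.1, st.2 ++ [ch])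
        else if st.2 ≠ [] then (st.1 ++ [pvToInt st.2], [])
        else st)
      (parts, cur)
     if st.2 ≠ [] then st.1 ++ [pvToInt st.2] else st.1) = parts ++ pvAGo cur cs := by
  induction cs with
  | nil => intro parts cur; by_cases h : cur = [] <;> simp [pvAGo, h]
  | cons c rest ih =>
    intro parts cur
    by_cases hd : PySem.Chars.isdigit c
    · simpa [pvAGo, hd] using ih parts (cur ++ [c])
    · by_cases h : cur = []
      · simpa [pvAGo, hd, h] using ih parts []
      · simpa [pvAGo, hd, h, List.append_assoc] using ih (parts ++ [pvToInt cur]) []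

lemma pvAGo_eq_altGo (cs : List Char) : ∀ (cur : List Char),
    pvAGo cur cs =
      if cur = [] then numeric_parts_altGo cs
      else pvToInt (cur ++ cs.takeWhile PySem.Chars.isdigit)
             :: numeric_parts_altGo (cs.dropWhile PySem.Chars.isdigit) := by
  induction cs with
  | nil =>
    intro cur
    by_cases h : cur = [] <;> simp [pvAGo, numeric_parts_altGo, h]
  | cons c rest ih =>
    intro cur
    by_cases hd : PySem.Chars.isdigit c
    · by_cases h : cur = []
      · subst h; simpa [pvAGo, numeric_parts_altGo, hd] using ih [c]
      · simpa [pvAGo, hd, h, List.append_assoc] using ih (cur ++ [c])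
    · by_cases h : cur = [] <;>
        simp [pvAGo, numeric_parts_altGo, hd, h, ih []]

-- ===== VERDICT (by name: the statement is the Claim_ definition above) =====
theorem numeric_parts_spec : Claim_equal_numeric_parts := by
  intro version _
  unfold Spec_numeric_parts numeric_parts numeric_parts_alt
  rw [pvAGo_eq_foldl version.toList [] []]
  simp [pvAGo_eq_altGo]
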